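-- pv_equiv track=rewrite | github.com/EdoAccetta/Tesi_Triennale_Fisica_Unimi_2019 | src/json_ristretto_maker.py | _find_first_minimo
-- ===== SOURCE A (Python) =====
-- def is_val_min(val_to_check, test_values):
--     for value in test_values:
--         if val_to_check >= value:
--             return False
--     return True
--
-- def _find_first_minimo(tempi, accuracy):
--     accuracy_half = int(accuracy / 2)
--     for x in range(accuracy_half, len(tempi) - accuracy_half):
--         test_values = []
--         for j in range(accuracy_half, 0, -1):
--             test_values.append(tempi[x - j])
--         for j in range(1, accuracy_half + 1):
--             test_values.append(tempi[x + j])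
--
--         val_to_check = tempi[x]
--
--         if is_val_min(val_to_check, test_values):
--             return x
--     return -1
-- ===== SOURCE B (Python) =====
-- def _find_first_minimo(tempi, accuracy):
--     h = int(accuracy / 2)
--     n = len(tempi)
--     if h < 0:
--         return -1
--     # prev_le[i]: largest j < i with tempi[j] <= tempi[i], else -1 (monotonic stack)
--     prev_le = [-1] * n
--     stack = []
--     for i in range(n):
--         while stack and tempi[stack[-1]] > tempi[i]:
--             stack.pop()
--         if stack:
--             prev_le[i] = stack[-1]
--         stack.append(i)
--     # next_le[i]: smallest j > i with tempi[j] <= tempi[i], else n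
--     next_le = [n] * n
--     stack = []
--     for i in range(n - 1, -1, -1):
--         while stack and tempi[stack[-1]] > tempi[i]:
--             stack.pop()
--         if stack:
--             next_le[i] = stack[-1]
--         stack.append(i)
--     for x in range(h, n - h):
--         if prev_le[x] < x - h and next_le[x] > x + h:
--             return x
--     return -1
-- ===== Notes on version B (the rewrite author's own statement) =====
-- stated objective: faster
-- what changed: B replaces A's per-candidate rebuild-and-scan of the whole 2*accuracy_half window (O(n*accuracy)) by two O(n) monotonic-stack passes computing, for every position, the nearest previous and next index holding a value <= it; a candidate x is the answer iff both lie outside the radius-accuracy_half window.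
-- intended difference: For accuracy with int(accuracy/2) <= -2 (and a list long enough that A does not crash), A returns the negative loop start accuracy_half as if it were an index -- an artifact of running range() with a negative half-width and Python's negative indexing -- while B returns the intended not-found value -1. — e.g. on _find_first_minimo([1, 2, 3, 4], -4): A returns -2, B returns -1
import Mathlib
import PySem

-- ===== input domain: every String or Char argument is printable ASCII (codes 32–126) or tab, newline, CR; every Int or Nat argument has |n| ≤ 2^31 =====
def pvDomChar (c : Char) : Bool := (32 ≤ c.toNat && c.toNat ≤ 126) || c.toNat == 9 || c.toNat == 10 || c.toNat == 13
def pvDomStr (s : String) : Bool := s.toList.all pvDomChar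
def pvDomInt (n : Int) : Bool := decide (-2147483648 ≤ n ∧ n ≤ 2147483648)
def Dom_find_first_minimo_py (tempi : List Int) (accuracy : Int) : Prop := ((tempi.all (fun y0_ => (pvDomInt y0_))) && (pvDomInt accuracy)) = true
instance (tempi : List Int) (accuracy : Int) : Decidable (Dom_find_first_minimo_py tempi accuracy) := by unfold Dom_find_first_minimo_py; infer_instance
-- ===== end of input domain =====

-- B replaces A's per-candidate window rebuild (O(n*accuracy)) by two monotonic-stack
-- nearest-smaller-or-equal passes (O(n)); for accuracy_half <= -2 A returns the negative
-- loop start (an artifact), B returns -1 (stated as D_ below).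


-- ===== PORT A =====
def is_val_min (val_to_check : Int) : List Int → Bool
  | [] => true
  | v :: rest => if val_to_check ≥ v then false else is_val_min val_to_check rest

def ffmLoopA (tempi : List Int) (ah : Int) : List Int → Int
  | [] => -1
  | x :: rest =>
      let test_values :=
        (PySem.List.pyRange ah 0 (-1)).map (fun j => PySem.List.pyGetD tempi (x - j) 0)
        ++ (PySem.List.pyRange 1 (ah + 1) 1).map (fun j => PySem.List.pyGetD tempi (x + j) 0)
      let val_to_check := PySem.List.pyGetD tempi x 0
      if is_val_min val_to_check test_values then x else ffmLoopA tempi ah rest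

def find_first_minimo_py (tempi : List Int) (accuracy : Int) : Int :=
  let accuracy_half := PySem.Int.truncdiv accuracy 2
  ffmLoopA tempi accuracy_half
    (PySem.List.pyRange accuracy_half ((tempi.length : Int) - accuracy_half) 1)

-- ===== PORT B =====
-- 'while stack and tempi[stack[-1]] > tempi[i]: stack.pop()'
def popGT (tempi : List Int) (v : Int) : List Int → List Int
  | [] => []
  | t :: s => if PySem.List.pyGetD tempi t 0 > v then popGT tempi v s else t :: s

-- one monotonic-stack pass over the index list, emitting the stack top (or dflt) per index
def lePass (tempi : List Int) (dflt : Int) : List Int → List Int → List Int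
  | _, [] => []
  | stack, i :: rest =>
      let s := popGT tempi (PySem.List.pyGetD tempi i 0) stack
      (match s with | [] => dflt | t :: _ => t) :: lePass tempi dflt (i :: s) rest

def ffmLoopB (prevLe nextLe : List Int) (h : Int) : List Int → Int
  | [] => -1
  | x :: rest =>
      if PySem.List.pyGetD prevLe x 0 < x - h ∧ x + h < PySem.List.pyGetD nextLe x 0 then x
      else ffmLoopB prevLe nextLe h rest

def find_first_minimo_py_alt (tempi : List Int) (accuracy : Int) : Int :=
  let h := PySem.Int.truncdiv accuracy 2
  let n : Int := tempi.length
  if h < 0 then -1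
  else
    let prevLe := lePass tempi (-1) [] (PySem.List.pyRange 0 n 1)
    let nextLe := (lePass tempi n [] (PySem.List.pyRange (n - 1) (-1) (-1))).reverse
    ffmLoopB prevLe nextLe h (PySem.List.pyRange h (n - h) 1)

-- ===== PRECONDITION & SPEC =====
-- Pre_ excludes exactly the inputs where A raises IndexError: accuracy_half below -len(tempi)
def Pre_find_first_minimo_py (tempi : List Int) (accuracy : Int) : Prop :=
  -(tempi.length : Int) ≤ PySem.Int.truncdiv accuracy 2
instance (tempi : List Int) (accuracy : Int) : Decidable (Pre_find_first_minimo_py tempi accuracy) := by unfold Pre_find_first_minimo_py; infer_instance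
def pvWitness_find_first_minimo_py : List Int × Int := ([3, 1, 2], 2)

-- For accuracy with int(accuracy/2) ≤ -2 (list long enough that A returns), A returns the
-- negative loop start accuracy_half as if it were an index — an artifact of an unguarded
-- range over a negative half-width — while B returns the intended not-found value -1.
def D_find_first_minimo_py (tempi : List Int) (accuracy : Int) : Prop :=
  PySem.Int.truncdiv accuracy 2 < -1
instance (tempi : List Int) (accuracy : Int) : Decidable (D_find_first_minimo_py tempi accuracy) := by unfold D_find_first_minimo_py; infer_instance

def Spec_find_first_minimo_py (tempi : List Int) (accuracy : Int) (out : Int) : Prop :=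
  ¬ D_find_first_minimo_py tempi accuracy → out = find_first_minimo_py_alt tempi accuracy
instance (tempi : List Int) (accuracy : Int) (out : Int) : Decidable (Spec_find_first_minimo_py tempi accuracy out) := by unfold Spec_find_first_minimo_py; infer_instance

def pvDiffWitness_find_first_minimo_py : List Int × Int := ([1, 2, 3, 4], -4)
def pvDiffWitnessOut_find_first_minimo_py : Int × Int := (-2, -1)

-- ===== CLAIM (what is proved, stated in full; the proofs are below) =====
def Claim_unchanged_find_first_minimo_py : Prop := ∀ (tempi : List Int) (accuracy : Int), Dom_find_first_minimo_py tempi accuracy → Pre_find_first_minimo_py tempi accuracy → Spec_find_first_minimo_py tempi accuracy (find_first_minimo_py tempi accuracy)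
def Claim_changed_find_first_minimo_py : Prop := Dom_find_first_minimo_py (pvDiffWitness_find_first_minimo_py.1) (pvDiffWitness_find_first_minimo_py.2) ∧ Pre_find_first_minimo_py (pvDiffWitness_find_first_minimo_py.1) (pvDiffWitness_find_first_minimo_py.2) ∧ D_find_first_minimo_py (pvDiffWitness_find_first_minimo_py.1) (pvDiffWitness_find_first_minimo_py.2) ∧ find_first_minimo_py (pvDiffWitness_find_first_minimo_py.1) (pvDiffWitness_find_first_minimo_py.2) = pvDiffWitnessOut_find_first_minimo_py.1 ∧ find_first_minimo_py_alt (pvDiffWitness_find_first_minimo_py.1) (pvDiffWitness_find_first_minimo_py.2) = pvDiffWitnessOut_find_first_minimo_py.2 ∧ pvDiffWitnessOut_find_first_minimo_py.1 ≠ pvDiffWitnessOut_find_first_minimo_py.2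
def Claim_exact_find_first_minimo_py : Prop := ∀ (tempi : List Int) (accuracy : Int), Dom_find_first_minimo_py tempi accuracy → Pre_find_first_minimo_py tempi accuracy → D_find_first_minimo_py tempi accuracy → find_first_minimo_py tempi accuracy ≠ find_first_minimo_py_alt tempi accuracy

-- ===== LEMMAS AND PROOFS =====

-- reference scan: first index j in the list with a[j] ≤ v, else dflt
def firstLE (a : List Int) (v dflt : Int) : List Int → Int
  | [] => dflt
  | j :: rest => if PySem.List.pyGetD a j 0 ≤ v then j else firstLE a v dflt rest

-- reference pass: like lePass but keeping the FULL history instead of the pruned stack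
def passSpec (a : List Int) (dflt : Int) : List Int → List Int → List Int
  | _, [] => []
  | hist, i :: rest =>
      firstLE a (PySem.List.pyGetD a i 0) dflt hist :: passSpec a dflt (i :: hist) rest

theorem popGT_head (a : List Int) (dflt : Int) :
    ∀ (S : List Int) (v : Int),
      (match popGT a v S with | [] => dflt | t :: _ => t) = firstLE a v dflt S := by
  intro S
  induction S with
  | nil => intro v; rfl
  | cons t s ih =>
    intro v
    simp only [popGT, firstLE]
    by_cases hc : PySem.List.pyGetD a t 0 > v
    · rw [if_pos hc, if_neg (by omega)]; exact ih v
    · rw [if_neg hc, if_pos (by omega)]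

theorem popGT_firstLE (a : List Int) (dflt : Int) :
    ∀ (S : List Int) (u v : Int), v < u →
      firstLE a v dflt (popGT a u S) = firstLE a v dflt S := by
  intro S
  induction S with
  | nil => intro u v _; rfl
  | cons t s ih =>
    intro u v huv
    simp only [popGT]
    by_cases hc : PySem.List.pyGetD a t 0 > u
    · rw [if_pos hc, ih u v huv]
      simp only [firstLE]
      rw [if_neg (by omega)]
    · rw [if_neg hc]

theorem lePass_eq_passSpec (a : List Int) (dflt : Int) :
    ∀ (idxs stack hist : List Int),
      (∀ v, firstLE a v dflt stack = firstLE a v dflt hist) →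
      lePass a dflt stack idxs = passSpec a dflt hist idxs := by
  intro idxs
  induction idxs with
  | nil => intro stack hist _; rfl
  | cons i rest ih =>
    intro stack hist hq
    simp only [lePass, passSpec]
    refine congrArg₂ (· :: ·) ?_ ?_
    · rw [popGT_head a dflt stack (PySem.List.pyGetD a i 0)]
      exact hq _
    · apply ih
      intro v
      simp only [firstLE]
      by_cases hc : PySem.List.pyGetD a i 0 ≤ v
      · rw [if_pos hc, if_pos hc]
      · rw [if_neg hc, if_neg hc]
        rw [popGT_firstLE a dflt stack (PySem.List.pyGetD a i 0) v (by omega)]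
        exact hq v

-- ascending pass over range(s, t): history at i is [i-1, …, 0]
theorem passSpec_asc (a : List Int) (dflt : Int) :
    ∀ (k : Nat) (s t : Int), 0 ≤ s → (t - s).toNat = k →
      passSpec a dflt (PySem.List.pyRange (s - 1) (-1) (-1)) (PySem.List.pyRange s t 1)
        = (PySem.List.pyRange s t 1).map
            (fun i => firstLE a (PySem.List.pyGetD a i 0) dflt (PySem.List.pyRange (i - 1) (-1) (-1))) := by
  intro k
  induction k with
  | zero =>
    intro s t _ hk
    rw [PySem.List.pyRange_one_eq_nil (by omega)]
    rfl
  | succ k ih =>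
    intro s t hs hk
    rw [PySem.List.pyRange_one_cons (show s < t by omega)]
    simp only [passSpec, List.map_cons]
    refine congrArg₂ (· :: ·) rfl ?_
    have hhist : (s : Int) :: PySem.List.pyRange (s - 1) (-1) (-1)
        = PySem.List.pyRange (s + 1 - 1) (-1) (-1) := by
      rw [show s + 1 - 1 = s by ring]
      exact (PySem.List.pyRange_neg_one_cons (by omega)).symm
    rw [hhist]
    exact ih (s + 1) t (by omega) (by omega)

-- descending pass over range(s, -1, -1): history at i is [i+1, …, n-1]
theorem passSpec_desc (a : List Int) (dflt : Int) (n : Int) :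
    ∀ (k : Nat) (s : Int), s < n → (s + 1).toNat = k →
      passSpec a dflt (PySem.List.pyRange (s + 1) n 1) (PySem.List.pyRange s (-1) (-1))
        = (PySem.List.pyRange s (-1) (-1)).map
            (fun i => firstLE a (PySem.List.pyGetD a i 0) dflt (PySem.List.pyRange (i + 1) n 1)) := by
  intro k
  induction k with
  | zero =>
    intro s _ hk
    rw [PySem.List.pyRange_neg_one_eq_nil (by omega)]
    rfl
  | succ k ih =>
    intro s hsn hk
    rw [PySem.List.pyRange_neg_one_cons (show (-1 : Int) < s by omega)]
    simp only [passSpec, List.map_cons]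
    refine congrArg₂ (· :: ·) rfl ?_
    have hhist : (s : Int) :: PySem.List.pyRange (s + 1) n 1
        = PySem.List.pyRange (s - 1 + 1) n 1 := by
      rw [show s - 1 + 1 = s by ring]
      exact (PySem.List.pyRange_one_cons hsn).symm
    rw [hhist]
    exact ih (s - 1) (by omega) (by omega)

theorem firstLE_mem_or_dflt (a : List Int) (v dflt : Int) :
    ∀ l : List Int, firstLE a v dflt l = dflt ∨ firstLE a v dflt l ∈ l := by
  intro l
  induction l with
  | nil => left; rfl
  | cons j rest ih =>
    simp only [firstLE]
    by_cases hc : PySem.List.pyGetD a j 0 ≤ v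
    · rw [if_pos hc]; right; simp
    · rw [if_neg hc]
      rcases ih with h1 | h1
      · left; exact h1
      · right; simp [h1]

-- bracket for the previous-smaller-or-equal scan
theorem firstLE_prev_lt (a : List Int) (v : Int) :
    ∀ (k : Nat) (x w : Int), 0 ≤ w → w ≤ x → x.toNat = k →
      (firstLE a v (-1) (PySem.List.pyRange (x - 1) (-1) (-1)) < w
        ↔ ∀ j : Int, w ≤ j → j < x → v < PySem.List.pyGetD a j 0) := by
  intro k
  induction k with
  | zero =>
    intro x w hw hwx hk
    rw [PySem.List.pyRange_neg_one_eq_nil (by omega)]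
    simp only [firstLE]
    constructor
    · intro _ j hj1 hj2; omega
    · intro _; omega
  | succ k ih =>
    intro x w hw hwx hk
    have hx1 : (0 : Int) < x := by omega
    rw [PySem.List.pyRange_neg_one_cons (show (-1 : Int) < x - 1 by omega)]
    simp only [firstLE]
    by_cases hle : PySem.List.pyGetD a (x - 1) 0 ≤ v
    · rw [if_pos hle]
      by_cases hwe : w = x
      · constructor
        · intro _ j hj1 hj2; omega
        · intro _; omega
      · constructor
        · intro hlt; omega
        · intro hall
          have := hall (x - 1) (by omega) (by omega)
          omega
    · rw [if_neg hle]
      rw [show x - 1 - 1 = (x - 1) - 1 by ring]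
      by_cases hwe : w = x
      · constructor
        · intro _ j hj1 hj2; omega
        · intro _
          rcases firstLE_mem_or_dflt a v (-1) (PySem.List.pyRange (x - 1 - 1) (-1) (-1)) with h1 | h1
          · omega
          · have := (PySem.List.mem_pyRange_neg_one).mp h1
            omega
      · have hih := ih (x - 1) w hw (by omega) (by omega)
        rw [hih]
        constructor
        · intro hall j hj1 hj2
          by_cases hj : j = x - 1
          · subst hj; omega
          · exact hall j hj1 (by omega)
        · intro hall j hj1 hj2
          exact hall j hj1 (by omega)

-- bracket for the next-smaller-or-equal scan
theorem firstLE_next_gt (a : List Int) (v n : Int) :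
    ∀ (k : Nat) (s u : Int), 0 ≤ s → s ≤ u → u ≤ n → (n - s).toNat = k →
      (u ≤ firstLE a v n (PySem.List.pyRange s n 1)
        ↔ ∀ j : Int, s ≤ j → j < u → v < PySem.List.pyGetD a j 0) := by
  intro k
  induction k with
  | zero =>
    intro s u hs hsu hun hk
    rw [PySem.List.pyRange_one_eq_nil (by omega)]
    simp only [firstLE]
    constructor
    · intro _ j hj1 hj2; omega
    · intro _; omega
  | succ k ih =>
    intro s u hs hsu hun hk
    have hsn : s < n := by omega
    rw [PySem.List.pyRange_one_cons hsn]
    simp only [firstLE]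
    by_cases hle : PySem.List.pyGetD a s 0 ≤ v
    · rw [if_pos hle]
      by_cases hue : u = s
      · constructor
        · intro _ j hj1 hj2; omega
        · intro _; omega
      · constructor
        · intro hlt; omega
        · intro hall
          have := hall s (by omega) (by omega)
          omega
    · rw [if_neg hle]
      by_cases hue : u = s
      · constructor
        · intro _ j hj1 hj2; omega
        · intro _
          rcases firstLE_mem_or_dflt a v n (PySem.List.pyRange (s + 1) n 1) with h1 | h1
          · omega
          · have := (PySem.List.mem_pyRange_one).mp h1
            omega
      · have hih := ih (s + 1) u (by omega) (by omega) hun (by omega)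
        rw [hih]
        constructor
        · intro hall j hj1 hj2
          by_cases hj : j = s
          · subst hj; omega
          · exact hall j (by omega) hj2
        · intro hall j hj1 hj2
          exact hall j (by omega) hj2

theorem is_val_min_iff (v : Int) :
    ∀ l : List Int, is_val_min v l = true ↔ ∀ y ∈ l, v < y := by
  intro l
  induction l with
  | nil => simp [is_val_min]
  | cons y rest ih =>
    simp only [is_val_min]
    by_cases hc : v ≥ y
    · rw [if_pos hc]
      simp only [List.mem_cons]
      constructor
      · intro h; cases h
      · intro h; exact absurd (h y (Or.inl rfl)) (by omega)
    · rw [if_neg hc, ih]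
      simp only [List.mem_cons]
      constructor
      · intro h y' hy'
        rcases hy' with rfl | hy'
        · omega
        · exact h y' hy'
      · intro h y' hy'; exact h y' (Or.inr hy')

-- A's per-candidate check equals B's two stack-scan brackets
theorem cond_equiv (tempi : List Int) (h x : Int) (hh : 0 ≤ h) (hx1 : h ≤ x)
    (hx2 : x < (tempi.length : Int) - h) :
    (is_val_min (PySem.List.pyGetD tempi x 0)
      ((PySem.List.pyRange h 0 (-1)).map (fun j => PySem.List.pyGetD tempi (x - j) 0)
        ++ (PySem.List.pyRange 1 (h + 1) 1).map (fun j => PySem.List.pyGetD tempi (x + j) 0)) = true)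
    ↔ (firstLE tempi (PySem.List.pyGetD tempi x 0) (-1) (PySem.List.pyRange (x - 1) (-1) (-1)) < x - h
       ∧ x + h < firstLE tempi (PySem.List.pyGetD tempi x 0) (tempi.length : Int)
            (PySem.List.pyRange (x + 1) (tempi.length : Int) 1)) := by
  set v := PySem.List.pyGetD tempi x 0 with hv
  set n := (tempi.length : Int) with hn
  rw [is_val_min_iff]
  have hprev := firstLE_prev_lt tempi v x.toNat x (x - h) (by omega) (by omega) rfl
  have hnext := firstLE_next_gt tempi v n (n - (x + 1)).toNat (x + 1) (x + h + 1)
    (by omega) (by omega) (by omega) rfl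
  constructor
  · intro hall
    constructor
    · rw [hprev]
      intro j hj1 hj2
      have hm := hall (PySem.List.pyGetD tempi (x - (x - j)) 0)
        (List.mem_append.mpr (Or.inl (List.mem_map.mpr
          ⟨x - j, (PySem.List.mem_pyRange_neg_one).mpr ⟨by omega, by omega⟩, rfl⟩)))
      rw [show x - (x - j) = j by ring] at hm
      exact hm
    · have hstep : x + h + 1 ≤ firstLE tempi v n (PySem.List.pyRange (x + 1) n 1) := by
        apply hnext.mpr
        intro j hj1 hj2
        have hm := hall (PySem.List.pyGetD tempi (x + (j - x)) 0)
          (List.mem_append.mpr (Or.inr (List.mem_map.mpr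
            ⟨j - x, (PySem.List.mem_pyRange_one).mpr ⟨by omega, by omega⟩, rfl⟩)))
        rw [show x + (j - x) = j by ring] at hm
        exact hm
      omega
  · rintro ⟨h1, h2⟩ y hy
    rcases List.mem_append.mp hy with hyl | hyr
    · rcases List.mem_map.mp hyl with ⟨j, hj, rfl⟩
      have hj' := (PySem.List.mem_pyRange_neg_one).mp hj
      exact (hprev.mp h1) (x - j) (by omega) (by omega)
    · rcases List.mem_map.mp hyr with ⟨j, hj, rfl⟩
      have hj' := (PySem.List.mem_pyRange_one).mp hj
      exact (hnext.mp (by omega)) (x + j) (by omega) (by omega)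

-- the two loops agree when their conditions agree on every member of the range
theorem loops_agree (a prevLe nextLe : List Int) (h : Int) :
    ∀ l : List Int,
      (∀ x ∈ l,
        (is_val_min (PySem.List.pyGetD a x 0)
          ((PySem.List.pyRange h 0 (-1)).map (fun j => PySem.List.pyGetD a (x - j) 0)
            ++ (PySem.List.pyRange 1 (h + 1) 1).map (fun j => PySem.List.pyGetD a (x + j) 0)) = true)
          ↔ (PySem.List.pyGetD prevLe x 0 < x - h ∧ x + h < PySem.List.pyGetD nextLe x 0)) →
      ffmLoopA a h l = ffmLoopB prevLe nextLe h l := by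
  intro l
  induction l with
  | nil => intro _; rfl
  | cons x rest ih =>
    intro hcond
    simp only [ffmLoopA, ffmLoopB]
    by_cases hb : PySem.List.pyGetD prevLe x 0 < x - h ∧ x + h < PySem.List.pyGetD nextLe x 0
    · rw [if_pos hb, if_pos ((hcond x (by simp)).2 hb)]
    · rw [if_neg hb, if_neg (fun ha => hb ((hcond x (by simp)).1 ha))]
      exact ih (fun y hy => hcond y (by simp [hy]))

-- ===== VERDICT (by name: the statement is the Claim_ definition above) =====
theorem find_first_minimo_py_spec : Claim_unchanged_find_first_minimo_py := by
  intro tempi accuracy _ hpre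
  unfold Spec_find_first_minimo_py
  intro hnd
  unfold Pre_find_first_minimo_py at hpre
  unfold D_find_first_minimo_py at hnd
  unfold find_first_minimo_py find_first_minimo_py_alt
  set h := PySem.Int.truncdiv accuracy 2 with hh
  set n := (tempi.length : Int) with hn
  have hn0 : 0 ≤ n := by positivity
  dsimp only
  rcases (show h = -1 ∨ 0 ≤ h by omega) with he | he
  · -- h = -1: A returns the first candidate x = -1 (empty test window); B takes the h < 0 branch
    rw [he]
    rw [if_pos (show (-1 : Int) < 0 by omega)]
    rw [PySem.List.pyRange_one_cons (show (-1 : Int) < n - -1 by omega)]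
    simp only [ffmLoopA]
    rw [PySem.List.pyRange_neg_one_eq_nil (by omega), PySem.List.pyRange_one_eq_nil (by omega)]
    simp [is_val_min]
  · -- 0 ≤ h: both loops scan range(h, n - h); conditions agree pointwise
    rw [if_neg (show ¬ h < 0 by omega)]
    have hprevL : lePass tempi (-1) [] (PySem.List.pyRange 0 n 1)
        = (PySem.List.pyRange 0 n 1).map
            (fun i => firstLE tempi (PySem.List.pyGetD tempi i 0) (-1)
              (PySem.List.pyRange (i - 1) (-1) (-1))) := by
      rw [lePass_eq_passSpec tempi (-1) (PySem.List.pyRange 0 n 1) []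
            (PySem.List.pyRange (0 - 1) (-1) (-1))
            (by rw [PySem.List.pyRange_neg_one_eq_nil (by omega)]; intro v; rfl)]
      exact passSpec_asc tempi (-1) (n - 0).toNat 0 n le_rfl rfl
    have hnextL : (lePass tempi n [] (PySem.List.pyRange (n - 1) (-1) (-1))).reverse
        = (PySem.List.pyRange 0 n 1).map
            (fun i => firstLE tempi (PySem.List.pyGetD tempi i 0) n
              (PySem.List.pyRange (i + 1) n 1)) := by
      rw [lePass_eq_passSpec tempi n (PySem.List.pyRange (n - 1) (-1) (-1)) []
            (PySem.List.pyRange (n - 1 + 1) n 1)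
            (by rw [show n - 1 + 1 = n by ring, PySem.List.pyRange_one_eq_nil le_rfl]; intro v; rfl)]
      rw [passSpec_desc tempi n n (n - 1 + 1).toNat (n - 1) (by omega) rfl]
      rw [PySem.List.pyRange_neg_one_eq_reverse]
      rw [show (-1 : Int) + 1 = 0 by ring, show n - 1 + 1 = n by ring]
      rw [List.map_reverse, List.reverse_reverse]
    apply loops_agree
    intro x hx
    have hxb := (PySem.List.mem_pyRange_one).mp hx
    rw [hprevL, hnextL]
    rw [PySem.List.pyGetD_map_pyRange_of_nonneg _ n x 0 (by omega) (by omega),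
        PySem.List.pyGetD_map_pyRange_of_nonneg _ n x 0 (by omega) (by omega)]
    exact cond_equiv tempi h x he hxb.1 hxb.2

theorem find_first_minimo_py_changed : Claim_changed_find_first_minimo_py := by
  unfold Claim_changed_find_first_minimo_py; decide

theorem find_first_minimo_py_tight : Claim_exact_find_first_minimo_py := by
  intro tempi accuracy _ hpre hd
  unfold Pre_find_first_minimo_py at hpre
  unfold D_find_first_minimo_py at hd
  unfold find_first_minimo_py find_first_minimo_py_alt
  set h := PySem.Int.truncdiv accuracy 2 with hh
  set n := (tempi.length : Int) with hn
  have hn0 : 0 ≤ n := by positivity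
  dsimp only
  rw [if_pos (show h < 0 by omega)]
  rw [PySem.List.pyRange_one_cons (show h < n - h by omega)]
  simp only [ffmLoopA]
  rw [PySem.List.pyRange_neg_one_eq_nil (by omega), PySem.List.pyRange_one_eq_nil (by omega)]
  simp only [List.map_nil, List.nil_append, is_val_min, if_pos]
  omega
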